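-- pv_equiv track=rewrite | github.com/hrlmartins/advent-of-code | 2024/19/main.py | part1
-- ===== SOURCE A (Python) =====
-- from typing import Any
--
-- def has_solution_count(towels, design, solution, mem):
--     if len(design) == 0:
--         return 1
--
--     if design in mem:
--         return mem[design]
--
--     mem[design] = 0
--     for ln in range(1, len(design) + 1):
--         match_prefix = design[:ln]
--         if match_prefix in towels:
--             solvable = has_solution_count(
--                 towels, design[ln:], solution + match_prefix, mem
--             )
--             if solvable > 0:
--                 mem[design] += solvable
--
--     return mem[design]
--
-- def part1(data: list[str]) -> Any:
--     towels = [t.strip() for t in data[0].split(",")]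
--     designs = data[2:]
--     towels_set = set(towels)
--     mem = {}
--     return sum(
--         has_solution_count(towels_set, design, "", mem) > 0 for design in designs
--     )
-- ===== SOURCE B (Python) =====
-- def part1(data: list[str]):
--     towels = {t.strip() for t in data[0].split(",")}
--     count = 0
--     for design in data[2:]:
--         L = len(design)
--         reach = [False] * (L + 1)
--         reach[0] = True
--         for i in range(L):
--             if reach[i]:
--                 for ln in range(1, L - i + 1):
--                     if design[i:i + ln] in towels:
--                         reach[i + ln] = True
--         count += reach[L]
--     return count
-- ===== Notes on version B (the rewrite author's own statement) =====
-- stated objective: alternative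
-- what changed: Replaces top-down recursion with a shared suffix-count memo dict by a per-design bottom-up boolean reachability table over prefix positions (reach[i+ln] set from reach[i] when design[i:i+ln] is a towel), counting designs with reach[L].
import Mathlib
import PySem

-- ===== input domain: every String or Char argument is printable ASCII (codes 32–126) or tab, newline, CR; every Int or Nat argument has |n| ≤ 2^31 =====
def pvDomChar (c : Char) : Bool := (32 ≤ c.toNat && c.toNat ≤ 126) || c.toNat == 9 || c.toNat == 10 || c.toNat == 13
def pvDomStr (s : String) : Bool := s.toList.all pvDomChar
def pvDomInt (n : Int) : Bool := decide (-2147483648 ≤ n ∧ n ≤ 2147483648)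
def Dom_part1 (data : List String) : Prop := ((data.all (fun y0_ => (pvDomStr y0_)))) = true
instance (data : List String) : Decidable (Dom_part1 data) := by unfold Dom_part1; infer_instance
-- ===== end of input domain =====

-- B replaces A's top-down recursive counting with a shared suffix memo dict by a per-design
-- bottom-up boolean reachability table over prefix positions (objective: alternative algorithmic
-- decomposition, similar cost).

-- ===== PORT A =====
-- has_solution_count, with the memo dict threaded through and a fuel argument (always called
-- with fuel = len(design); the fuel-0 branch is unreachable, it only makes the recursion structural).
def hscA (towels : PySem.Set String) : Nat → String → String → PySem.Dict String Int → Int × PySem.Dict String Int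
  | fuel, design, solution, mem =>
    if PySem.Str.len design == 0 then (1, mem)
    else if mem.contains design then (mem.getD design 0, mem)
    else
      let mem1 := mem.insert design 0
      match fuel with
      | 0 => (mem1.getD design 0, mem1)
      | fuel + 1 =>
        let mem2 := (PySem.List.pyRange 1 (PySem.Str.len design + 1) 1).foldl (fun m ln =>
          let matchPrefix := PySem.Str.slice design none (some ln)
          if PySem.Set.contains towels matchPrefix then
            let r := hscA towels fuel (PySem.Str.slice design (some ln) none) (solution ++ matchPrefix) m
            if r.1 > 0 then r.2.modify design 0 (· + r.1) else r.2
          else m) mem1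
        (mem2.getD design 0, mem2)

def part1 (data : List String) : Int :=
  let towels := ((PySem.Str.split? (data.headD "") ",").getD []).map (fun t => PySem.Str.strip t)
  let designs := PySem.List.slice data (some 2) none
  let towelsSet := PySem.Set.ofList towels
  (designs.foldl (fun acc design =>
      let r := hscA towelsSet (PySem.Str.len design).toNat design "" acc.2
      (acc.1 + (if r.1 > 0 then (1 : Int) else 0), r.2))
    ((0 : Int), (PySem.Dict.empty : PySem.Dict String Int))).1

-- ===== PORT B =====
def part1_alt (data : List String) : Int :=
  let towels := PySem.Set.ofList (((PySem.Str.split? (data.headD "") ",").getD []).map (fun t => PySem.Str.strip t))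
  (PySem.List.slice data (some 2) none).foldl (fun count design =>
    let L := PySem.Str.len design
    let reach0 := PySem.List.pySetD (List.replicate (L.toNat + 1) false) 0 true
    let reach := (PySem.List.pyRange 0 L 1).foldl (fun reach i =>
      if PySem.List.pyGetD reach i false then
        (PySem.List.pyRange 1 (L - i + 1) 1).foldl (fun reach ln =>
          if PySem.Set.contains towels (PySem.Str.slice design (some i) (some (i + ln))) then
            PySem.List.pySetD reach (i + ln) true
          else reach) reach
      else reach) reach0
    count + (if PySem.List.pyGetD reach L false then 1 else 0)) 0

-- ===== PRECONDITION & SPEC =====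
-- Pre_ excludes only the empty list, on which A raises IndexError at data[0].
def Pre_part1 (data : List String) : Prop := data ≠ []
instance (data : List String) : Decidable (Pre_part1 data) := by unfold Pre_part1; infer_instance
def pvWitness_part1 : List String := ["a, b, ab", "", "ab", "ba"]

def Spec_part1 (data : List String) (out : Int) : Prop := out = part1_alt data
instance (data : List String) (out : Int) : Decidable (Spec_part1 data out) := by unfold Spec_part1; infer_instance

-- ===== CLAIM (what is proved, stated in full; the proofs are below) =====
def Claim_equal_part1 : Prop := ∀ (data : List String), Dom_part1 data → Pre_part1 data → Spec_part1 data (part1 data)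

-- ===== LEMMAS AND PROOFS =====

-- Number of decompositions of cs into towel prefixes (the value A memoizes).
def ways (T : PySem.Set String) (cs : List Char) : Int :=
  if h : cs = [] then 1
  else ((List.range cs.length).attach.map (fun i =>
      if PySem.Set.contains T (String.ofList (cs.take (i.1 + 1))) then ways T (cs.drop (i.1 + 1)) else 0)).sum
termination_by cs.length
decreasing_by
  have : i.1 < cs.length := List.mem_range.mp i.2
  simp [List.length_drop]
  omega

-- partial sum of ways over the first j prefix lengths
def pways (T : PySem.Set String) (cs : List Char) (j : Nat) : Int :=
  ((List.range j).map (fun i =>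
      if PySem.Set.contains T (String.ofList (cs.take (i + 1))) then ways T (cs.drop (i + 1)) else 0)).sum

theorem ways_nil (T : PySem.Set String) : ways T [] = 1 := by simp [ways]

theorem ways_eq_pways (T : PySem.Set String) (cs : List Char) (h : cs ≠ []) :
    ways T cs = pways T cs cs.length := by
  rw [ways, dif_neg h, pways]
  simp only [List.map_subtype, List.unattach_attach]

theorem pways_zero (T : PySem.Set String) (cs : List Char) : pways T cs 0 = 0 := by
  simp [pways]

theorem pways_succ (T : PySem.Set String) (cs : List Char) (j : Nat) :
    pways T cs (j + 1) = pways T cs j +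
      (if PySem.Set.contains T (String.ofList (cs.take (j + 1))) then ways T (cs.drop (j + 1)) else 0) := by
  simp [pways, List.range_succ]

theorem ways_nonneg (T : PySem.Set String) (cs : List Char) : 0 ≤ ways T cs := by
  rw [ways]
  split
  · norm_num
  · apply List.sum_nonneg
    intro x hx
    simp only [List.mem_map] at hx
    obtain ⟨i, hi, rfl⟩ := hx
    split
    · exact ways_nonneg T _
    · exact le_refl 0
termination_by cs.length
decreasing_by
  have : i.1 < cs.length := List.mem_range.mp i.2
  simp [List.length_drop]
  omega

-- cs is a concatenation of (nonempty) towels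
def CanD (T : PySem.Set String) (cs : List Char) : Prop :=
  ∃ parts : List (List Char),
    (∀ p ∈ parts, p ≠ [] ∧ PySem.Set.contains T (String.ofList p) = true) ∧ parts.flatten = cs

theorem sum_le_zero_of_forall_nonpos (l : List Int) (hc : ∀ x ∈ l, x ≤ 0) : l.sum ≤ 0 := by
  induction l with
  | nil => simp
  | cons a t ih =>
    simp only [List.sum_cons]
    have := hc a (by simp)
    have := ih (fun x hx => hc x (by simp [hx]))
    omega

theorem ways_pos_iff (T : PySem.Set String) (cs : List Char) : 0 < ways T cs ↔ CanD T cs := by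
  constructor
  · intro hpos
    by_cases h : cs = []
    · exact ⟨[], by simp, by simp [h]⟩
    · rw [ways_eq_pways T cs h, pways] at hpos
      have hex : ∃ x ∈ (List.range cs.length).map (fun i =>
          if PySem.Set.contains T (String.ofList (cs.take (i + 1))) = true then ways T (cs.drop (i + 1)) else 0),
          0 < x := by
        by_contra hc
        push Not at hc
        exact absurd hpos (not_lt.mpr (sum_le_zero_of_forall_nonpos _ hc))
      obtain ⟨x, hxmem, hxpos⟩ := hex
      simp only [List.mem_map, List.mem_range] at hxmem
      obtain ⟨i, hi, rfl⟩ := hxmem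
      by_cases hcont : PySem.Set.contains T (String.ofList (cs.take (i + 1))) = true
      · rw [if_pos hcont] at hxpos
        obtain ⟨parts, hp, hflat⟩ := (ways_pos_iff T (cs.drop (i + 1))).mp hxpos
        refine ⟨cs.take (i + 1) :: parts, ?_, ?_⟩
        · intro p hp'
          rcases List.mem_cons.mp hp' with rfl | hmem
          · refine ⟨?_, hcont⟩
            intro htake
            have hlen : min (i + 1) cs.length = 0 := by
              rw [← List.length_take, htake]; rfl
            have : cs.length ≠ 0 := fun hz => h (List.eq_nil_of_length_eq_zero hz)
            omega
          · exact hp p hmem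
        · simp [hflat]
      · rw [if_neg hcont] at hxpos; omega
  · rintro ⟨parts, hp, hflat⟩
    rcases parts with _ | ⟨p, rest⟩
    · simp only [List.flatten_nil] at hflat
      rw [← hflat, ways_nil]
      norm_num
    · obtain ⟨hpne, hpcont⟩ := hp p (by simp)
      have hplen : 0 < p.length := List.length_pos_iff.mpr hpne
      have hlencs : cs.length = p.length + rest.flatten.length := by
        rw [← hflat]; simp
      have hcs : cs ≠ [] := by
        intro hz
        rw [hz] at hlencs
        simp at hlencs
        omega
      have hfpos : 0 < ways T rest.flatten :=
        (ways_pos_iff T rest.flatten).mpr ⟨rest, fun q hq => hp q (by simp [hq]), rfl⟩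
      rw [ways_eq_pways T cs hcs, pways]
      have hi1 : p.length - 1 + 1 = p.length := by omega
      have htake : cs.take (p.length - 1 + 1) = p := by
        rw [hi1, ← hflat]
        simp only [List.flatten_cons]
        exact List.take_left
      have hdrop : cs.drop (p.length - 1 + 1) = rest.flatten := by
        rw [hi1, ← hflat]
        simp only [List.flatten_cons]
        exact List.drop_left
      have hmem : ways T rest.flatten ∈ (List.range cs.length).map (fun i =>
          if PySem.Set.contains T (String.ofList (cs.take (i + 1))) = true then ways T (cs.drop (i + 1)) else 0) := by
        refine List.mem_map.mpr ⟨p.length - 1, List.mem_range.mpr (by omega), ?_⟩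
        rw [htake, hdrop, if_pos hpcont]
      refine lt_of_lt_of_le hfpos (List.single_le_sum ?_ _ hmem)
      intro x hx
      simp only [List.mem_map] at hx
      obtain ⟨i, _, rfl⟩ := hx
      split
      · exact ways_nonneg T _
      · exact le_refl 0
termination_by cs.length
decreasing_by
  · simp [List.length_drop]
    omega
  · omega

-- ---------- A side: memoization correctness ----------

def Good (T : PySem.Set String) (mem : PySem.Dict String Int) (n : Nat) : Prop :=
  ∀ k : String, mem.contains k = true → k.toList.length ≤ n → mem.getD k 0 = ways T k.toList

theorem Good_mono (T : PySem.Set String) (mem : PySem.Dict String Int) {m n : Nat}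
    (h : m ≤ n) (hg : Good T mem n) : Good T mem m :=
  fun k hc hl => hg k hc (le_trans hl h)

-- one iteration of the prefix-length loop of hscA (the foldl body with ln = 1 + k)
def stepA (T : PySem.Set String) (f : Nat) (design sol : String)
    (m : PySem.Dict String Int) (k : Nat) : PySem.Dict String Int :=
  let ln : Int := 1 + (k : Int)
  let matchPrefix := PySem.Str.slice design none (some ln)
  if PySem.Set.contains T matchPrefix = true then
    let r := hscA T f (PySem.Str.slice design (some ln) none) (sol ++ matchPrefix) m
    if r.1 > 0 then r.2.modify design 0 (· + r.1) else r.2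
  else m

theorem toList_slice_take (s : String) (j : Nat) :
    (PySem.Str.slice s none (some (1 + (j : Int)))).toList = s.toList.take (j + 1) := by
  rw [PySem.Str.toList_slice, PySem.Chars.slice_eq_listSlice, PySem.List.slice_to _ (by positivity)]
  congr 1
  omega

theorem toList_slice_drop (s : String) (j : Nat) :
    (PySem.Str.slice s (some (1 + (j : Int))) none).toList = s.toList.drop (j + 1) := by
  rw [PySem.Str.toList_slice, PySem.Chars.slice_eq_listSlice, PySem.List.slice_from _ (by positivity)]
  congr 1
  omega

theorem ne_of_toList_length_ne {s t : String} (h : s.toList.length ≠ t.toList.length) : s ≠ t :=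
  fun he => h (by rw [he])

theorem foldl_stepA (T : PySem.Set String) (f : Nat) (design sol : String)
    (mem1 : PySem.Dict String Int) :
    (PySem.List.pyRange 1 (PySem.Str.len design + 1) 1).foldl (fun m ln =>
        let matchPrefix := PySem.Str.slice design none (some ln)
        if PySem.Set.contains T matchPrefix then
          let r := hscA T f (PySem.Str.slice design (some ln) none) (sol ++ matchPrefix) m
          if r.1 > 0 then r.2.modify design 0 (· + r.1) else r.2
        else m) mem1
      = (List.range design.toList.length).foldl (stepA T f design sol) mem1 := by
  rw [PySem.Str.len_eq, PySem.List.pyRange_one, List.foldl_map]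
  have : ((design.toList.length : Int) + 1 - 1).toNat = design.toList.length := by omega
  rw [this]
  rfl

theorem hscA_unfold (T : PySem.Set String) (f : Nat) (design sol : String)
    (mem : PySem.Dict String Int)
    (h0 : ¬ (PySem.Str.len design == 0) = true) (hc : ¬ mem.contains design = true) :
    hscA T (f + 1) design sol mem =
      (((List.range design.toList.length).foldl (stepA T f design sol) (mem.insert design 0)).getD design 0,
       (List.range design.toList.length).foldl (stepA T f design sol) (mem.insert design 0)) := by
  conv_lhs => rw [hscA]
  rw [if_neg h0, if_neg hc, ← foldl_stepA]

theorem hscA_correct (T : PySem.Set String) :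
    ∀ n (design : String), design.toList.length ≤ n →
    ∀ fuel, design.toList.length ≤ fuel → ∀ sol mem, Good T mem design.toList.length →
      (hscA T fuel design sol mem).1 = ways T design.toList
      ∧ Good T (hscA T fuel design sol mem).2 design.toList.length
      ∧ (∀ k : String, k ≠ design → design.toList.length ≤ k.toList.length →
          (hscA T fuel design sol mem).2.contains k = mem.contains k
          ∧ (hscA T fuel design sol mem).2.getD k 0 = mem.getD k 0) := by
  intro n
  induction n using Nat.strong_induction_on with
  | _ n IH =>
  intro design hdn fuel hfuel sol mem hGood
  by_cases hL0 : design.toList.length = 0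
  · have hnil : design.toList = [] := List.eq_nil_of_length_eq_zero hL0
    have hcond : (PySem.Str.len design == 0) = true := by
      simp only [PySem.Str.len_eq, beq_iff_eq, Nat.cast_eq_zero]
      exact hL0
    rw [hscA, if_pos hcond]
    exact ⟨by rw [hnil, ways_nil], hGood, fun k _ _ => ⟨rfl, rfl⟩⟩
  · have hLpos : 0 < design.toList.length := Nat.pos_of_ne_zero hL0
    have hcond : ¬ (PySem.Str.len design == 0) = true := by
      simp only [PySem.Str.len_eq, beq_iff_eq, Nat.cast_eq_zero]
      exact hL0
    by_cases hcont : mem.contains design = true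
    · rw [hscA, if_neg hcond, if_pos hcont]
      exact ⟨hGood design hcont le_rfl, hGood, fun k _ _ => ⟨rfl, rfl⟩⟩
    · cases fuel with
      | zero => omega
      | succ f =>
        rw [hscA_unfold T f design sol mem hcond hcont]
        set L := design.toList.length with hLdef
        -- the loop invariant
        have key : ∀ j, j ≤ L →
            ((List.range j).foldl (stepA T f design sol) (mem.insert design 0)).contains design = true
            ∧ ((List.range j).foldl (stepA T f design sol) (mem.insert design 0)).getD design 0
                = pways T design.toList j
            ∧ Good T ((List.range j).foldl (stepA T f design sol) (mem.insert design 0)) (L - 1)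
            ∧ (∀ k : String, k ≠ design → L ≤ k.toList.length →
                ((List.range j).foldl (stepA T f design sol) (mem.insert design 0)).contains k = mem.contains k
                ∧ ((List.range j).foldl (stepA T f design sol) (mem.insert design 0)).getD k 0 = mem.getD k 0) := by
          intro j
          induction j with
          | zero =>
            intro _
            simp only [List.range_zero, List.foldl_nil]
            refine ⟨PySem.Dict.contains_insert_self mem design 0, ?_, ?_, ?_⟩
            · rw [PySem.Dict.getD_insert, if_pos rfl, pways_zero]
            · intro k hck hlk
              have hkne : k ≠ design := by
                apply ne_of_toList_length_ne
                omega
              rw [PySem.Dict.getD_insert, if_neg hkne]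
              rw [PySem.Dict.contains_insert] at hck
              simp only [Bool.or_eq_true, beq_iff_eq] at hck
              exact hGood k (hck.resolve_left hkne) (by omega)
            · intro k hkne hlk
              constructor
              · rw [PySem.Dict.contains_insert]
                simp [hkne]
              · rw [PySem.Dict.getD_insert, if_neg hkne]
          | succ j ihj =>
            intro hj1
            have hj : j ≤ L := by omega
            obtain ⟨ic, iv, ig, ip⟩ := ihj hj
            set mj := (List.range j).foldl (stepA T f design sol) (mem.insert design 0) with hmj
            rw [List.range_succ, List.foldl_append, List.foldl_cons, List.foldl_nil]
            -- one step
            show (stepA T f design sol mj j).contains design = true ∧ _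
            rw [stepA]
            have hmp : PySem.Str.slice design none (some (1 + (j : Int)))
                = String.ofList (design.toList.take (j + 1)) := by
              apply String.toList_inj.mp
              rw [toList_slice_take]
              simp
            by_cases hmatch : PySem.Set.contains T (PySem.Str.slice design none (some (1 + (j : Int)))) = true
            · rw [if_pos hmatch]
              -- recursive call
              set design' := PySem.Str.slice design (some (1 + (j : Int))) none with hdes'
              have hdl : design'.toList = design.toList.drop (j + 1) := toList_slice_drop design j
              have hdlen : design'.toList.length = L - (j + 1) := by
                rw [hdl, List.length_drop]
              have hlt : L - 1 < n := by omega
              have hrec := IH (L - 1) hlt design' (by omega) f (by omega)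
                (sol ++ PySem.Str.slice design none (some (1 + (j : Int)))) mj
                (Good_mono T mj (by omega) ig)
              obtain ⟨rv, rg, rp⟩ := hrec
              set r := hscA T f design'
                (sol ++ PySem.Str.slice design none (some (1 + (j : Int)))) mj with hr
              have hdne : design ≠ design' := ne_of_toList_length_ne (by omega)
              have hdp := rp design hdne (by omega)
              -- Good at L-1 for r.2
              have rg' : Good T r.2 (L - 1) := by
                intro k hck hlk
                by_cases hsmall : k.toList.length ≤ design'.toList.length
                · exact rg k hck hsmall
                · have hkne' : k ≠ design' := ne_of_toList_length_ne (by omega)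
                  obtain ⟨pc, pv⟩ := rp k hkne' (by omega)
                  rw [pv]
                  rw [pc] at hck
                  exact ig k hck hlk
              have hwaysnn := ways_nonneg T design'.toList
              have hpw : pways T design.toList (j + 1)
                  = pways T design.toList j + ways T (design.toList.drop (j + 1)) := by
                rw [pways_succ, ← hmp]
                rw [if_pos hmatch]
              by_cases hrpos : r.1 > 0
              · rw [if_pos hrpos]
                refine ⟨?_, ?_, ?_, ?_⟩
                · rw [PySem.Dict.contains_modify]
                  simp [hdp.1, ic]
                · rw [PySem.Dict.getD_modify, if_pos rfl, hdp.2, iv, hpw, rv, hdl]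
                · intro k hck hlk
                  have hkne : k ≠ design := ne_of_toList_length_ne (by omega)
                  rw [PySem.Dict.getD_modify, if_neg hkne]
                  rw [PySem.Dict.contains_modify] at hck
                  simp only [Bool.or_eq_true, beq_iff_eq] at hck
                  exact rg' k (hck.resolve_left hkne) hlk
                · intro k hkne hlk
                  have hkne' : k ≠ design' := ne_of_toList_length_ne (by omega)
                  obtain ⟨pc, pv⟩ := rp k hkne' (by omega)
                  obtain ⟨qc, qv⟩ := ip k hkne hlk
                  constructor
                  · rw [PySem.Dict.contains_modify, beq_eq_false_iff_ne.mpr hkne,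
                        Bool.false_or, pc, qc]
                  · rw [PySem.Dict.getD_modify, if_neg hkne, pv, qv]
              · rw [if_neg hrpos]
                have hwz : ways T (design.toList.drop (j + 1)) = 0 := by
                  have hnn := ways_nonneg T design'.toList
                  rw [rv] at hrpos
                  rw [← hdl]
                  omega
                refine ⟨?_, ?_, rg', ?_⟩
                · rw [hdp.1, ic]
                · rw [hdp.2, iv, hpw, hwz, add_zero]
                · intro k hkne hlk
                  have hkne' : k ≠ design' := ne_of_toList_length_ne (by omega)
                  obtain ⟨pc, pv⟩ := rp k hkne' (by omega)
                  obtain ⟨qc, qv⟩ := ip k hkne hlk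
                  exact ⟨by rw [pc, qc], by rw [pv, qv]⟩
            · rw [if_neg hmatch]
              have hpw : pways T design.toList (j + 1) = pways T design.toList j := by
                rw [pways_succ, ← hmp, if_neg hmatch, add_zero]
              exact ⟨ic, by rw [iv, hpw], ig, ip⟩
        obtain ⟨kc, kv, kg, kp⟩ := key L le_rfl
        set mem2 := (List.range L).foldl (stepA T f design sol) (mem.insert design 0) with hmem2
        have hv2 : mem2.getD design 0 = ways T design.toList := by
          rw [kv, ← ways_eq_pways T design.toList (List.length_pos_iff.mp hLpos)]
        refine ⟨hv2, ?_, ?_⟩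
        · intro k hck hlk
          by_cases hkd : k = design
          · subst hkd
            exact hv2
          · by_cases hsmall : k.toList.length ≤ L - 1
            · exact kg k hck hsmall
            · obtain ⟨pc, pv⟩ := kp k hkd (by omega)
              rw [pv]
              rw [pc] at hck
              exact hGood k hck (by omega)
        · intro k hkne hlk
          exact kp k hkne hlk

-- ---------- B side: reachability ----------

-- the characters d[k:j]
def seg (d : List Char) (k j : Nat) : List Char := (d.drop k).take (j - k)

-- "position j is reachable using final towels that start before position m"
def ReachP (T : PySem.Set String) (d : List Char) (m j : Nat) : Prop :=
  j = 0 ∨ ∃ k, k < m ∧ k < j ∧ CanD T (d.take k)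
    ∧ PySem.Set.contains T (String.ofList (seg d k j)) = true

theorem getD_set_bool (l : List Bool) (n j : Nat) (v d : Bool) (hn : n < l.length) :
    (l.set n v).getD j d = if j = n then v else l.getD j d := by
  simp only [List.getD_eq_getElem?_getD, List.getElem?_set]
  split
  · rename_i h; subst h; simp
  · rename_i h; rw [if_neg (fun hh => h hh.symm)]

theorem ReachP_iff_CanD (T : PySem.Set String) (d : List Char) (m j : Nat)
    (hjm : j ≤ m) (hjL : j ≤ d.length) : ReachP T d m j ↔ CanD T (d.take j) := by
  constructor
  · rintro (rfl | ⟨k, _, hkj, ⟨parts, hps, hflat⟩, hcont⟩)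
    · exact ⟨[], by simp, by simp⟩
    · refine ⟨parts ++ [seg d k j], ?_, ?_⟩
      · intro p hp
        rcases List.mem_append.mp hp with hp | hp
        · exact hps p hp
        · rw [List.mem_singleton.mp hp]
          refine ⟨?_, hcont⟩
          have : (seg d k j).length = min (j - k) (d.length - k) := by
            simp [seg]
          intro hz
          rw [hz] at this
          simp at this
          omega
      · rw [List.flatten_append, hflat]
        simp only [List.flatten_cons, List.flatten_nil, List.append_nil]
        have h4 : k + (j - k) - k = j - k := by omega
        have : j = k + (j - k) := by omega
        rw [this, List.take_add, seg, h4]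
  · rintro ⟨parts, hps, hflat⟩
    by_cases hj0 : j = 0
    · exact Or.inl hj0
    · right
      rcases List.eq_nil_or_concat' parts with rfl | ⟨init, p, rfl⟩
      · simp only [List.flatten_nil] at hflat
        have := congrArg List.length hflat
        simp [List.length_take] at this
        omega
      · obtain ⟨hpne, hpcont⟩ := hps p (by simp)
        rw [List.flatten_concat] at hflat
        have hlenj : (d.take j).length = j := by
          rw [List.length_take]
          omega
        have hple : p.length ≤ j := by
          have := congrArg List.length hflat
          simp only [List.length_append] at this
          omega
        have hki : init.flatten.length = j - p.length := by
          have := congrArg List.length hflat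
          simp only [List.length_append] at this
          omega
        have hppos : 0 < p.length := List.length_pos_iff.mpr hpne
        refine ⟨j - p.length, by omega, by omega, ?_, ?_⟩
        · refine ⟨init, fun q hq => hps q (by simp [hq]), ?_⟩
          have h1 : init.flatten = (d.take j).take (j - p.length) := by
            rw [← hflat, ← hki, List.take_left]
          rw [h1, List.take_take]
          congr 1
          omega
        · have h2 : p = (d.take j).drop (j - p.length) := by
            rw [← hflat, ← hki, List.drop_left]
          have h3 : seg d (j - p.length) j = p := by
            rw [seg, ← List.drop_take]
            exact h2.symm
          rw [h3]
          exact hpcont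

theorem ReachP_succ (T : PySem.Set String) (d : List Char) (m j : Nat) :
    ReachP T d (m + 1) j ↔ ReachP T d m j ∨
      (m < j ∧ CanD T (d.take m)
        ∧ PySem.Set.contains T (String.ofList (seg d m j)) = true) := by
  constructor
  · rintro (rfl | ⟨k, hkm, hkj, hcan, hcont⟩)
    · exact Or.inl (Or.inl rfl)
    · by_cases hk : k = m
      · subst hk
        exact Or.inr ⟨hkj, hcan, hcont⟩
      · exact Or.inl (Or.inr ⟨k, by omega, hkj, hcan, hcont⟩)
  · rintro ((rfl | ⟨k, hkm, hkj, hcan, hcont⟩) | ⟨hmj, hcan, hcont⟩)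
    · exact Or.inl rfl
    · exact Or.inr ⟨k, by omega, hkj, hcan, hcont⟩
    · exact Or.inr ⟨m, by omega, hmj, hcan, hcont⟩

theorem reachB (T : PySem.Set String) (design : String) :
    (PySem.List.pyGetD ((PySem.List.pyRange 0 (PySem.Str.len design) 1).foldl
      (fun reach i =>
        if PySem.List.pyGetD reach i false then
          (PySem.List.pyRange 1 (PySem.Str.len design - i + 1) 1).foldl (fun reach ln =>
            if PySem.Set.contains T (PySem.Str.slice design (some i) (some (i + ln))) then
              PySem.List.pySetD reach (i + ln) true
            else reach) reach
        else reach)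
      (PySem.List.pySetD (List.replicate ((PySem.Str.len design).toNat + 1) false) 0 true))
      (PySem.Str.len design) false = true) ↔ CanD T design.toList := by
  set d := design.toList with hd
  set L := d.length with hL
  have hlen : PySem.Str.len design = (L : Int) := PySem.Str.len_eq design
  rw [hlen]
  have htoNat : ((L : Int)).toNat = L := Int.toNat_natCast L
  rw [htoNat]
  have hreach0 : PySem.List.pySetD (List.replicate (L + 1) false) 0 true
      = (List.replicate (L + 1) false).set 0 true := by
    rw [show ((0 : Int)) = ((0 : Nat) : Int) from rfl, PySem.List.pySetD,
        PySem.List.pySet?_natCast _ _ _ (by simp)]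
    rfl
  rw [hreach0]
  rw [PySem.List.pyRange_one, List.foldl_map]
  have hsub : (((L : Int)) - 0).toNat = L := by omega
  rw [hsub]
  have inv : ∀ m, m ≤ L →
      ((List.range m).foldl (fun (reach : List Bool) (k : Nat) =>
        (fun reach i =>
          if PySem.List.pyGetD reach i false then
            (PySem.List.pyRange 1 ((L : Int) - i + 1) 1).foldl (fun reach ln =>
              if PySem.Set.contains T (PySem.Str.slice design (some i) (some (i + ln))) then
                PySem.List.pySetD reach (i + ln) true
              else reach) reach
          else reach) reach ((0 : Int) + (k : Int)))
        ((List.replicate (L + 1) false).set 0 true)).length = L + 1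
      ∧ ∀ j, j ≤ L →
        (((List.range m).foldl (fun (reach : List Bool) (k : Nat) =>
          (fun reach i =>
            if PySem.List.pyGetD reach i false then
              (PySem.List.pyRange 1 ((L : Int) - i + 1) 1).foldl (fun reach ln =>
                if PySem.Set.contains T (PySem.Str.slice design (some i) (some (i + ln))) then
                  PySem.List.pySetD reach (i + ln) true
                else reach) reach
            else reach) reach ((0 : Int) + (k : Int)))
          ((List.replicate (L + 1) false).set 0 true)).getD j false = true ↔ ReachP T d m j) := by
    intro m
    induction m with
    | zero =>
      intro _
      simp only [List.range_zero, List.foldl_nil]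
      constructor
      · simp
      · intro j hj
        rw [getD_set_bool _ _ _ _ _ (by simp)]
        constructor
        · intro hget
          by_cases hj0 : j = 0
          · exact Or.inl hj0
          · rw [if_neg hj0] at hget
            exfalso
            have : j < L + 1 := by omega
            rw [List.getD_eq_getElem?_getD] at hget
            simp [this] at hget
        · rintro (rfl | ⟨k, hk, _⟩)
          · simp
          · omega
    | succ m ihm =>
      intro hm1
      have hm : m ≤ L := by omega
      obtain ⟨ilen, iiff⟩ := ihm hm
      rw [List.range_succ, List.foldl_append, List.foldl_cons, List.foldl_nil]
      beta_reduce
      set rm := (List.range m).foldl _ ((List.replicate (L + 1) false).set 0 true) with hrm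
      have h0m : ((0 : Int) + (m : Int)) = ((m : Nat) : Int) := by omega
      rw [h0m, PySem.List.pyGetD_natCast]
      by_cases hreach : rm.getD m false = true
      · rw [if_pos hreach]
        have hcanm : CanD T (d.take m) :=
          (ReachP_iff_CanD T d m m le_rfl (by omega)).mp ((iiff m (by omega)).mp hreach)
        have hbound : ((L : Int) - (m : Int) + 1 - 1).toNat = L - m := by omega
        rw [PySem.List.pyRange_one, hbound, List.foldl_map]
        have hinner : ∀ q, q ≤ L - m →
            ((List.range q).foldl (fun (reach : List Bool) (k : Nat) =>
              (fun reach ln =>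
                if PySem.Set.contains T (PySem.Str.slice design (some ((m : Nat) : Int)) (some (((m : Nat) : Int) + ln))) then
                  PySem.List.pySetD reach (((m : Nat) : Int) + ln) true
                else reach) reach ((1 : Int) + (k : Int))) rm).length = L + 1
            ∧ ∀ j, j ≤ L →
              (((List.range q).foldl (fun (reach : List Bool) (k : Nat) =>
                (fun reach ln =>
                  if PySem.Set.contains T (PySem.Str.slice design (some ((m : Nat) : Int)) (some (((m : Nat) : Int) + ln))) then
                    PySem.List.pySetD reach (((m : Nat) : Int) + ln) true
                  else reach) reach ((1 : Int) + (k : Int))) rm).getD j false = true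
                ↔ (rm.getD j false = true ∨ (m < j ∧ j ≤ m + q
                    ∧ PySem.Set.contains T (String.ofList (seg d m j)) = true))) := by
          intro q
          induction q with
          | zero =>
            intro _
            simp only [List.range_zero, List.foldl_nil]
            exact ⟨ilen, fun j hj => ⟨fun h => Or.inl h, by rintro (h | ⟨_, h2, _⟩); exact h; omega⟩⟩
          | succ q ihq =>
            intro hq1
            have hq : q ≤ L - m := by omega
            obtain ⟨qlen, qiff⟩ := ihq hq
            rw [List.range_succ, List.foldl_append, List.foldl_cons, List.foldl_nil]
            beta_reduce
            set rq := (List.range q).foldl _ rm with hrq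
            have hidx : (((m : Nat) : Int) + ((1 : Int) + (q : Int))) = (((m + q + 1 : Nat)) : Int) := by
              push_cast
              ring
            have harg : PySem.Str.slice design (some ((m : Nat) : Int)) (some (((m : Nat) : Int) + ((1 : Int) + (q : Int))))
                = String.ofList (seg d m (m + q + 1)) := by
              apply String.toList_inj.mp
              rw [PySem.Str.toList_slice, PySem.Chars.slice_eq_listSlice, hidx,
                  PySem.List.slice_natCast]
              rw [String.toList_ofList]
              rw [seg, ← hd]
            rw [harg]
            by_cases hcont : PySem.Set.contains T (String.ofList (seg d m (m + q + 1))) = true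
            · rw [if_pos hcont, hidx]
              have hlt : m + q + 1 < rq.length := by omega
              have hsetd : PySem.List.pySetD rq ((m + q + 1 : Nat) : Int) true
                  = rq.set (m + q + 1) true := by
                rw [PySem.List.pySetD, PySem.List.pySet?_natCast _ _ _ hlt]
                rfl
              rw [hsetd]
              refine ⟨by simp [qlen], ?_⟩
              intro j hj
              rw [getD_set_bool _ _ _ _ _ hlt]
              by_cases hjq : j = m + q + 1
              · subst hjq
                rw [if_pos rfl]
                simp only [true_iff]
                exact Or.inr ⟨by omega, by omega, hcont⟩
              · rw [if_neg hjq, qiff j hj]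
                constructor
                · rintro (h | ⟨h1, h2, h3⟩)
                  · exact Or.inl h
                  · exact Or.inr ⟨h1, by omega, h3⟩
                · rintro (h | ⟨h1, h2, h3⟩)
                  · exact Or.inl h
                  · exact Or.inr ⟨h1, by omega, h3⟩
            · rw [if_neg hcont]
              refine ⟨qlen, ?_⟩
              intro j hj
              rw [qiff j hj]
              constructor
              · rintro (h | ⟨h1, h2, h3⟩)
                · exact Or.inl h
                · exact Or.inr ⟨h1, by omega, h3⟩
              · rintro (h | ⟨h1, h2, h3⟩)
                · exact Or.inl h
                · by_cases hjq : j = m + q + 1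
                  · subst hjq
                    exact absurd h3 hcont
                  · exact Or.inr ⟨h1, by omega, h3⟩
        obtain ⟨flen, fiff⟩ := hinner (L - m) le_rfl
        refine ⟨flen, ?_⟩
        intro j hj
        rw [fiff j hj, ReachP_succ, iiff j hj]
        constructor
        · rintro (h | ⟨h1, h2, h3⟩)
          · exact Or.inl h
          · exact Or.inr ⟨h1, hcanm, h3⟩
        · rintro (h | ⟨h1, _, h3⟩)
          · exact Or.inl h
          · exact Or.inr ⟨h1, by omega, h3⟩
      · rw [if_neg hreach]
        refine ⟨ilen, ?_⟩
        intro j hj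
        rw [iiff j hj, ReachP_succ]
        constructor
        · exact Or.inl
        · rintro (h | ⟨h1, hcan, h3⟩)
          · exact h
          · exfalso
            apply hreach
            exact (iiff m (by omega)).mpr ((ReachP_iff_CanD T d m m le_rfl (by omega)).mpr hcan)
  obtain ⟨flen, fiff⟩ := inv L le_rfl
  rw [PySem.List.pyGetD_natCast]
  rw [fiff L le_rfl, ReachP_iff_CanD T d L L le_rfl le_rfl]
  rw [List.take_length]

def GoodAll (T : PySem.Set String) (mem : PySem.Dict String Int) : Prop :=
  ∀ k : String, mem.contains k = true → mem.getD k 0 = ways T k.toList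

theorem fold_eq (T : PySem.Set String) :
    ∀ (ds : List String) (acc : Int) (mem : PySem.Dict String Int), GoodAll T mem →
      (ds.foldl (fun acc design =>
          let r := hscA T (PySem.Str.len design).toNat design "" acc.2
          (acc.1 + (if r.1 > 0 then (1 : Int) else 0), r.2)) (acc, mem)).1
      = ds.foldl (fun count design =>
          let L := PySem.Str.len design
          let reach0 := PySem.List.pySetD (List.replicate (L.toNat + 1) false) 0 true
          let reach := (PySem.List.pyRange 0 L 1).foldl (fun reach i =>
            if PySem.List.pyGetD reach i false then
              (PySem.List.pyRange 1 (L - i + 1) 1).foldl (fun reach ln =>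
                if PySem.Set.contains T (PySem.Str.slice design (some i) (some (i + ln))) then
                  PySem.List.pySetD reach (i + ln) true
                else reach) reach
            else reach) reach0
          count + (if PySem.List.pyGetD reach L false then 1 else 0)) acc := by
  intro ds
  induction ds with
  | nil => intro acc mem _; rfl
  | cons design ds ih =>
    intro acc mem hG
    simp only [List.foldl_cons]
    have hfuel : (PySem.Str.len design).toNat = design.toList.length := by
      rw [PySem.Str.len_eq, Int.toNat_natCast]
    have hGd : Good T mem design.toList.length := fun k hc _ => hG k hc
    have hrec := hscA_correct T design.toList.length design le_rfl
      ((PySem.Str.len design).toNat) (by omega) "" mem hGd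
    obtain ⟨rv, rg, rp⟩ := hrec
    set r := hscA T (PySem.Str.len design).toNat design "" mem with hr
    have hG' : GoodAll T r.2 := by
      intro k hck
      by_cases hsmall : k.toList.length ≤ design.toList.length
      · exact rg k hck hsmall
      · have hkne : k ≠ design := ne_of_toList_length_ne (by omega)
        obtain ⟨pc, pv⟩ := rp k hkne (by omega)
        rw [pv]
        rw [pc] at hck
        exact hG k hck
    have hterm : (if PySem.List.pyGetD ((PySem.List.pyRange 0 (PySem.Str.len design) 1).foldl (fun reach i =>
            if PySem.List.pyGetD reach i false then
              (PySem.List.pyRange 1 (PySem.Str.len design - i + 1) 1).foldl (fun reach ln =>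
                if PySem.Set.contains T (PySem.Str.slice design (some i) (some (i + ln))) then
                  PySem.List.pySetD reach (i + ln) true
                else reach) reach
            else reach) (PySem.List.pySetD (List.replicate ((PySem.Str.len design).toNat + 1) false) 0 true))
            (PySem.Str.len design) false then (1 : Int) else 0)
        = (if r.1 > 0 then (1 : Int) else 0) := by
      have hiff := reachB T design
      rw [rv]
      by_cases hw : (0 : Int) < ways T design.toList
      · rw [if_pos hw]
        rw [if_pos (hiff.mpr ((ways_pos_iff T design.toList).mp hw))]
      · rw [if_neg hw]
        rw [if_neg (fun hb => hw ((ways_pos_iff T design.toList).mpr (hiff.mp hb)))]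
    rw [hterm] at *
    exact ih _ _ hG'

theorem part1_eq_alt (data : List String) : part1 data = part1_alt data := by
  unfold part1 part1_alt
  apply fold_eq
  intro k hck
  have hfalse : (PySem.Dict.empty : PySem.Dict String Int).contains k = false := rfl
  rw [hfalse] at hck
  cases hck

-- ===== VERDICT (by name: the statement is the Claim_ definition above) =====
theorem part1_spec : Claim_equal_part1 := by
  intro data _ _
  exact part1_eq_alt data
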